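-- pv_equiv track=rewrite | github.com/jmiba/ai-service-chatbot | app_korr.py | render_with_citations_by_index
-- ===== SOURCE A (Python) =====
-- def render_with_citations_by_index(text_html, citation_map, placements):
--     """
--     Insert citations at the specified character indices with proper superscript formatting.
--     """
--     s = text_html or ""
--     n = len(s)
--
--     # Sort placements in reverse order to avoid index shifting
--     for idx, num in sorted(placements, key=lambda x: x[0], reverse=True):
--         note = citation_map.get(num)
--         if not note:
--             continue
--
--         # Use HTML superscript for professional citation formatting
--         citation = f'<sup>[{num}]</sup>'
--         i = max(0, min(n, idx))
--         s = s[:i] + citation + s[i:]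
--
--     return s
-- ===== SOURCE B (Python) =====
-- def render_with_citations_by_index(text_html, citation_map, placements):
--     # Back-to-front segment collection: walk the same descending order, but instead of
--     # re-splicing the whole string per placement, cut off suffix segments, collect
--     # pieces in a list, and join once in reversed order.
--     s = text_html or ""
--     n = len(s)
--     parts = []
--     end = n
--     for idx, num in sorted(placements, key=lambda x: x[0], reverse=True):
--         if citation_map.get(num):
--             i = max(0, min(n, idx))
--             parts.append(s[i:end])
--             parts.append('<sup>[{}]</sup>'.format(num))
--             end = i
--     parts.append(s[:end])
--     return ''.join(reversed(parts))
-- ===== Notes on version B (the rewrite author's own statement) =====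
-- stated objective: alternative
-- what changed: A rebuilds the entire string with a fresh slice-and-concat for every placement; B walks the same descending order once but only cuts the suffix segment between consecutive insertion points, stacks segments and citation tags in a list, and joins once in reversed order.
import Mathlib
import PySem

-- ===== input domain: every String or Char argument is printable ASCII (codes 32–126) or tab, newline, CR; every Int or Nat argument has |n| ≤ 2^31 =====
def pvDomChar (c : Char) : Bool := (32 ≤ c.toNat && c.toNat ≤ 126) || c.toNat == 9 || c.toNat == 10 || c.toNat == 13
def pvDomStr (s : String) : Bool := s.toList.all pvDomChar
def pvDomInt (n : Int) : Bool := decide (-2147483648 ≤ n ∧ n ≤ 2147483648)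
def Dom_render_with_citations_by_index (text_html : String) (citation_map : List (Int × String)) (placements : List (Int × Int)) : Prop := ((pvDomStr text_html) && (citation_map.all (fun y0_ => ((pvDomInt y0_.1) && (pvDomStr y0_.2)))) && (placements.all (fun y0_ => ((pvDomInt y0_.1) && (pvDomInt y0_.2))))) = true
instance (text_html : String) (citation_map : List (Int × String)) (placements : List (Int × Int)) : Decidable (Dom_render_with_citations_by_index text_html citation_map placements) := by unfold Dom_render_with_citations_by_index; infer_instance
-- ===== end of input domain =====

-- B replaces A's per-placement whole-string splicing by back-to-front segment collection:
-- it cuts suffix segments off the untouched source, stacks pieces in a list, joins once.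

-- ===== PORT A =====
-- citation_map.get(num): dict lookup on the association list (first match)
def pvCmGet (citation_map : List (Int × String)) (num : Int) : Option String :=
  (citation_map.find? (fun q => q.1 == num)).map (·.2)

-- f'<sup>[{num}]</sup>' / '<sup>[{}]</sup>'.format(num)
def pvCite (num : Int) : List Char :=
  "<sup>[".toList ++ PySem.Int.toChars num ++ "]</sup>".toList

def render_with_citations_by_index (text_html : String) (citation_map : List (Int × String)) (placements : List (Int × Int)) : String :=
  let s0 := text_html.toList              -- s = text_html or ""  (identity on a string input)
  let n : Int := s0.length
  let res := (PySem.List.sorted placements (fun x => x.1) true).foldl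
    (fun s p =>
      match pvCmGet citation_map p.2 with
      | none => s                          -- if not note: continue  (missing key)
      | some note =>
        if note = "" then s                -- if not note: continue  (empty string)
        else
          let i : Int := max 0 (min n p.1)
          PySem.List.slice s none (some i) ++ pvCite p.2 ++ PySem.List.slice s (some i) none)
    s0
  String.ofList res

-- ===== PORT B =====
-- truthiness of `citation_map.get(num)` (None and '' are falsy)
def pvTruthy (o : Option String) : Bool :=
  match o with
  | none => false
  | some t => !(t = "")

def render_with_citations_by_index_alt (text_html : String) (citation_map : List (Int × String)) (placements : List (Int × Int)) : String :=
  let s := text_html.toList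
  let n : Int := s.length
  let r := (PySem.List.sorted placements (fun x => x.1) true).foldl
    (fun (acc : List (List Char) × Int) p =>
      if pvTruthy (pvCmGet citation_map p.2) then
        let i : Int := max 0 (min n p.1)
        (acc.1 ++ [PySem.List.slice s (some i) (some acc.2), pvCite p.2], i)
      else acc)
    ([], n)
  String.ofList ((r.1 ++ [PySem.List.slice s none (some r.2)]).reverse.flatten)

-- ===== PRECONDITION & SPEC =====
def Spec_render_with_citations_by_index (text_html : String) (citation_map : List (Int × String)) (placements : List (Int × Int)) (out : String) : Prop := out = render_with_citations_by_index_alt text_html citation_map placements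
instance (text_html : String) (citation_map : List (Int × String)) (placements : List (Int × Int)) (out : String) : Decidable (Spec_render_with_citations_by_index text_html citation_map placements out) := by unfold Spec_render_with_citations_by_index; infer_instance

-- ===== CLAIM (what is proved, stated in full; the proofs are below) =====
def Claim_equal_render_with_citations_by_index : Prop := ∀ (text_html : String) (citation_map : List (Int × String)) (placements : List (Int × Int)), Dom_render_with_citations_by_index text_html citation_map placements → Spec_render_with_citations_by_index text_html citation_map placements (render_with_citations_by_index text_html citation_map placements)

-- ===== LEMMAS AND PROOFS =====

-- an effective placement: its clamped (Nat) position and the citation text; none = skipped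
def pvEnt (citation_map : List (Int × String)) (n : Int) (p : Int × Int) : Option (Nat × List Char) :=
  match pvCmGet citation_map p.2 with
  | none => none
  | some note => if note = "" then none else some ((max 0 (min n p.1)).toNat, pvCite p.2)

def pvFoldA (ents : List (Nat × List Char)) (s : List Char) : List Char :=
  ents.foldl (fun s e => s.take e.1 ++ e.2 ++ s.drop e.1) s

-- B's step/fold on Nat positions
def pvStepC (s : List Char) (acc : List (List Char) × Nat) (e : Nat × List Char) : List (List Char) × Nat :=
  (acc.1 ++ [(s.drop e.1).take (acc.2 - e.1), e.2], e.1)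

def pvFoldC (s : List Char) (ents : List (Nat × List Char)) (acc : List (List Char) × Nat) : List (List Char) × Nat :=
  ents.foldl (pvStepC s) acc

theorem pvEnt_pos {cm : List (Int × String)} {n : Int} {p : Int × Int} {e : Nat × List Char}
    (h : pvEnt cm n p = some e) : e.1 = (max 0 (min n p.1)).toNat := by
  unfold pvEnt at h
  rcases hg : pvCmGet cm p.2 with _ | note <;> rw [hg] at h
  · exact absurd h (by simp)
  · by_cases hn : note = "" <;> simp [hn] at h
    simp [← h]

-- A's fold with in-loop skipping = pvFoldA over the effective placements
theorem pvA_fold (cm : List (Int × String)) (n : Int) :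
    ∀ (L : List (Int × Int)) (t : List Char),
    L.foldl (fun s p =>
      match pvCmGet cm p.2 with
      | none => s
      | some note =>
        if note = "" then s
        else
          PySem.List.slice s none (some (max 0 (min n p.1))) ++ pvCite p.2
            ++ PySem.List.slice s (some (max 0 (min n p.1))) none) t
    = pvFoldA (L.filterMap (pvEnt cm n)) t := by
  intro L
  induction L with
  | nil => intro t; simp [pvFoldA]
  | cons p rest ih =>
    intro t
    simp only [List.foldl_cons, List.filterMap_cons]
    rcases hg : pvCmGet cm p.2 with _ | note
    · simpa [pvEnt, hg] using ih t
    · by_cases hn : note = ""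
      · simpa [pvEnt, hg, hn] using ih t
      · have h0 : (0:Int) ≤ max 0 (min n p.1) := le_max_left _ _
        have hent : pvEnt cm n p = some ((max 0 (min n p.1)).toNat, pvCite p.2) := by
          simp [pvEnt, hg, hn]
        rw [hent]
        simp only [if_neg hn]
        rw [ih]
        simp [pvFoldA, PySem.List.slice_to _ h0, PySem.List.slice_from _ h0]

-- B's fold with the truthiness guard and Int position = pvFoldC over the effective placements
theorem pvB_fold (cm : List (Int × String)) (s : List Char) (n : Int) :
    ∀ (M : List (Int × Int)) (parts : List (List Char)) (endN : Nat),
    M.foldl (fun (acc : List (List Char) × Int) p =>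
      if pvTruthy (pvCmGet cm p.2) then
        (acc.1 ++ [PySem.List.slice s (some (max 0 (min n p.1))) (some acc.2), pvCite p.2],
          max 0 (min n p.1))
      else acc) (parts, (endN : Int))
    = ((pvFoldC s (M.filterMap (pvEnt cm n)) (parts, endN)).1,
       ((pvFoldC s (M.filterMap (pvEnt cm n)) (parts, endN)).2 : Int)) := by
  intro M
  induction M with
  | nil => intro parts endN; simp [pvFoldC]
  | cons p rest ih =>
    intro parts endN
    simp only [List.foldl_cons, List.filterMap_cons]
    rcases hg : pvCmGet cm p.2 with _ | note
    · simpa [pvEnt, pvTruthy, hg] using ih parts endN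
    · by_cases hn : note = ""
      · simpa [pvEnt, pvTruthy, hg, hn] using ih parts endN
      · have h0 : (0:Int) ≤ max 0 (min n p.1) := le_max_left _ _
        have hent : pvEnt cm n p = some ((max 0 (min n p.1)).toNat, pvCite p.2) := by
          simp [pvEnt, hg, hn]
        rw [hent]
        have htr : pvTruthy (some note) = true := by simp [pvTruthy, hn]
        simp only [htr, if_true]
        have hcast : max 0 (min n p.1) = (((max 0 (min n p.1)).toNat : Nat) : Int) :=
          (Int.toNat_of_nonneg h0).symm
        rw [hcast, PySem.List.slice_natCast, ih]
        simp [pvFoldC, pvStepC]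

-- insertions at positions ≤ |u| never touch a suffix glued after u
theorem pvA_prefix_local :
    ∀ (ents : List (Nat × List Char)) (u t : List Char),
    (∀ e ∈ ents, e.1 ≤ u.length) →
    pvFoldA ents (u ++ t) = pvFoldA ents u ++ t := by
  intro ents
  induction ents with
  | nil => intro u t _; rfl
  | cons e rest ih =>
    intro u t hb
    have he : e.1 ≤ u.length := hb e (List.mem_cons_self)
    simp only [pvFoldA, List.foldl_cons]
    rw [List.take_append_of_le_length he, List.drop_append_of_le_length he]
    have := ih (u.take e.1 ++ e.2 ++ u.drop e.1) t (by
      intro e' he'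
      have := hb e' (List.mem_cons_of_mem _ he')
      simp [List.length_take, List.length_drop]
      omega)
    simpa [pvFoldA, List.append_assoc] using this

-- MAIN: repeated splicing in nonincreasing position order = suffix-segment stacking,
-- with the leftover prefix glued in front at the end
theorem pvMain (s : List Char) :
    ∀ (ents : List (Nat × List Char)) (parts : List (List Char)) (endN : Nat),
    ents.Pairwise (fun a b => b.1 ≤ a.1) →
    (∀ e ∈ ents, e.1 ≤ endN) → endN ≤ s.length →
    s.take (pvFoldC s ents (parts, endN)).2
        ++ (pvFoldC s ents (parts, endN)).1.reverse.flatten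
      = pvFoldA ents (s.take endN) ++ parts.reverse.flatten := by
  intro ents
  induction ents with
  | nil => intro parts endN _ _ _; simp [pvFoldC, pvFoldA]
  | cons e rest ih =>
    intro parts endN hpw hb hend
    have hi : e.1 ≤ endN := hb e (List.mem_cons_self)
    have hil : e.1 ≤ s.length := le_trans hi hend
    have hrest : ∀ e' ∈ rest, e'.1 ≤ e.1 := fun e' he' => (List.pairwise_cons.1 hpw).1 e' he'
    -- one step of C
    have hC : pvFoldC s (e :: rest) (parts, endN)
        = pvFoldC s rest (parts ++ [(s.drop e.1).take (endN - e.1), e.2], e.1) := rfl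
    rw [hC, ih _ _ ((List.pairwise_cons.1 hpw).2) hrest hil]
    -- one step of A
    have hlen : (s.take e.1).length = e.1 := by simp; omega
    have htt : (s.take endN).take e.1 = s.take e.1 := by
      rw [List.take_take, Nat.min_eq_left hi]
    have htd : (s.take endN).drop e.1 = (s.drop e.1).take (endN - e.1) := List.drop_take
    have hA : pvFoldA (e :: rest) (s.take endN)
        = pvFoldA rest (s.take e.1 ++ (e.2 ++ (s.drop e.1).take (endN - e.1))) := by
      simp [pvFoldA, htt, htd]
    rw [hA, pvA_prefix_local rest _ _ (fun e' he' => by rw [hlen]; exact hrest e' he')]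
    simp [List.append_assoc]

theorem pvEnt_le {cm : List (Int × String)} {s : List Char} {p : Int × Int} {e : Nat × List Char}
    (h : pvEnt cm (s.length : Int) p = some e) : e.1 ≤ s.length := by
  have := pvEnt_pos h
  omega

-- ===== VERDICT (by name: the statement is the Claim_ definition above) =====
theorem render_with_citations_by_index_spec : Claim_equal_render_with_citations_by_index := by
  intro text_html citation_map placements _
  unfold Spec_render_with_citations_by_index
  unfold render_with_citations_by_index render_with_citations_by_index_alt
  simp only []
  set s := text_html.toList with hs
  set n : Int := (s.length : Int) with hn
  set L := PySem.List.sorted placements (fun x => x.1) true with hL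
  set ents := L.filterMap (pvEnt citation_map n) with hents
  have hA := pvA_fold citation_map n L s
  have hB := pvB_fold citation_map s n L [] s.length
  have hpw : ents.Pairwise (fun a b => b.1 ≤ a.1) := by
    have hsp := PySem.List.sorted_pairwise_rev placements (fun x => x.1)
    rw [← hL] at hsp
    rw [hents, List.pairwise_filterMap]
    refine hsp.imp_of_mem ?_
    intro p q _ _ hle e he e' he'
    rw [pvEnt_pos (Option.mem_def.1 he), pvEnt_pos (Option.mem_def.1 he')]
    omega
  have hbd : ∀ e ∈ ents, e.1 ≤ s.length := by
    intro e he
    rcases List.mem_filterMap.1 (hents ▸ he) with ⟨p, _, hp⟩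
    exact pvEnt_le (by simpa [hn] using hp)
  have hmain := pvMain s ents [] s.length hpw hbd le_rfl
  simp only [List.take_length, List.reverse_nil, List.flatten_nil, List.append_nil] at hmain
  rw [← hents] at hA
  rw [← hn, ← hents] at hB
  rw [hA, hB]
  have h2 : (0:Int) ≤ ((pvFoldC s ents ([], s.length)).2 : Int) := Int.natCast_nonneg _
  rw [PySem.List.slice_to _ h2]
  simp only [Int.toNat_natCast, List.reverse_append, List.reverse_cons, List.reverse_nil,
    List.nil_append, List.flatten_append, List.flatten_cons, List.flatten_nil, List.append_nil]
  rw [hmain]
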